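-- pv_equiv track=rewrite | github.com/cory-schneider/wicked_forecasting | forecastapp/reportgen/utils.py | merge_wslr
-- ===== SOURCE A (Python) =====
-- wslr_info = {
--     "Great Bay Dist" : [40901, 40915],
--     "North Florida Sales" : [70918, 70923],
--     "Bernie Little Dist" : [40920, 40919],
--     "Southern Crown Partners" : [43975, 43925],
--     "Southern Crown Brunswick" : [91094, 21052, 21075],
--     "RH Barringer" : [53234, 53296, 33245],
--     "Harris Beverage" : [63221, 63236],
--     "Carolina Eagle" : [43233, 43272]
--     }
--
-- def merge_wslr(wslr_id):
--     """Identifies which wholesaler warehouses need to be merged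
--     from preset dictionary called wslr_info. May eventually allow user
--     input for this feature, or draw from a csv file instead of
--     building into the script itself."""
--     for x, y in wslr_info.items():
--         if wslr_id not in y:
--             continue
--         else:
--             #row[0] = str(x).upper()
--             wslr_id = ', '.join(map(str, y))
--             break
--     wslr_id = str(wslr_id)
--     return wslr_id
-- ===== SOURCE B (Python) =====
-- wslr_info = {
--     "Great Bay Dist" : [40901, 40915],
--     "North Florida Sales" : [70918, 70923],
--     "Bernie Little Dist" : [40920, 40919],
--     "Southern Crown Partners" : [43975, 43925],
--     "Southern Crown Brunswick" : [91094, 21052, 21075],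
--     "RH Barringer" : [53234, 53296, 33245],
--     "Harris Beverage" : [63221, 63236],
--     "Carolina Eagle" : [43233, 43272]
--     }
--
-- # Reverse index built once: each warehouse id -> comma-joined sibling string.
-- _merged_by_id = {wid: ', '.join(map(str, ids))
--                  for ids in wslr_info.values()
--                  for wid in ids}
--
-- def merge_wslr(wslr_id):
--     return _merged_by_id.get(wslr_id, str(wslr_id))
-- ===== Notes on version B (the rewrite author's own statement) =====
-- stated objective: idiomatic
-- what changed: Replaces the loop scanning every wholesaler's warehouse list with a module-level reverse dictionary mapping each warehouse id to its precomputed joined string, so merge_wslr is a single dict .get with str(wslr_id) fallback.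
import Mathlib
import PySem

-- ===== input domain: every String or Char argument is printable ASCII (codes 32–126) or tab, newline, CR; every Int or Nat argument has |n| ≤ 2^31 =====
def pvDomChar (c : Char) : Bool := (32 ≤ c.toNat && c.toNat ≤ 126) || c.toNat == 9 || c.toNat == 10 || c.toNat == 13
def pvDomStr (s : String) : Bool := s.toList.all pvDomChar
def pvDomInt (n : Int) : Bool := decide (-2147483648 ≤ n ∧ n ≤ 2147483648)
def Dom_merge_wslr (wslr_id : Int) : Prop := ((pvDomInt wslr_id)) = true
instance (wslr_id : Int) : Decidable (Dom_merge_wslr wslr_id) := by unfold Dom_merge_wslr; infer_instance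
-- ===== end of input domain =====

-- B replaces A's scan over all wholesaler lists by a precomputed reverse index (id -> joined string); idiomatic, not claimed faster.

-- ===== PORT A =====
-- the module-level dict wslr_info, as an association list in insertion order
def wslr_info : List (String × List Int) :=
  [("Great Bay Dist", [40901, 40915]),
   ("North Florida Sales", [70918, 70923]),
   ("Bernie Little Dist", [40920, 40919]),
   ("Southern Crown Partners", [43975, 43925]),
   ("Southern Crown Brunswick", [91094, 21052, 21075]),
   ("RH Barringer", [53234, 53296, 33245]),
   ("Harris Beverage", [63221, 63236]),
   ("Carolina Eagle", [43233, 43272])]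

-- A's for-loop with break: first y containing wslr_id rebinds it to ', '.join(map(str, y))
def merge_wslr_loop (wslr_id : Int) : List (String × List Int) → Option String
  | [] => none
  | (_, y) :: rest =>
      if y.contains wslr_id then
        some (PySem.Str.join ", " (y.map PySem.Int.toStr))
      else
        merge_wslr_loop wslr_id rest

def merge_wslr (wslr_id : Int) : String :=
  match merge_wslr_loop wslr_id wslr_info with
  | some s => s          -- wslr_id was rebound to the joined string; str() is identity on it
  | none => PySem.Int.toStr wslr_id   -- loop fell through: str(wslr_id)

-- ===== PORT B =====
-- the module-level reverse dict _merged_by_id: each id -> joined string of its sibling list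
def merged_by_id : PySem.Dict Int String :=
  wslr_info.foldl (fun d p =>
    p.2.foldl (fun d wid => d.insert wid (PySem.Str.join ", " (p.2.map PySem.Int.toStr))) d)
    (PySem.Dict.empty)

def merge_wslr_alt (wslr_id : Int) : String :=
  merged_by_id.getD wslr_id (PySem.Int.toStr wslr_id)

-- ===== PRECONDITION & SPEC =====
def Spec_merge_wslr (wslr_id : Int) (out : String) : Prop := out = merge_wslr_alt wslr_id
instance (wslr_id : Int) (out : String) : Decidable (Spec_merge_wslr wslr_id out) := by unfold Spec_merge_wslr; infer_instance

-- ===== CLAIM (what is proved, stated in full; the proofs are below) =====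
def Claim_equal_merge_wslr : Prop := ∀ (wslr_id : Int), Dom_merge_wslr wslr_id → Spec_merge_wslr wslr_id (merge_wslr wslr_id)

-- ===== LEMMAS AND PROOFS =====

-- the 20 warehouse ids appearing anywhere in wslr_info
def pvAllIds : List Int :=
  [40901, 40915, 70918, 70923, 40920, 40919, 43975, 43925, 91094, 21052, 21075,
   53234, 53296, 33245, 63221, 63236, 43233, 43272]

-- off the id list, A falls through the loop and B misses the dict: both give str(wslr_id)
theorem merge_wslr_eq_of_not_mem (wslr_id : Int) (h : wslr_id ∉ pvAllIds) :
    merge_wslr wslr_id = merge_wslr_alt wslr_id := by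
  simp only [pvAllIds, List.mem_cons, List.not_mem_nil, or_false] at h
  push Not at h
  obtain ⟨h1,h2,h3,h4,h5,h6,h7,h8,h9,h10,h11,h12,h13,h14,h15,h16,h17,h18⟩ := h
  simp [merge_wslr, merge_wslr_alt, merge_wslr_loop, wslr_info, merged_by_id,
    PySem.Dict.getD, PySem.Dict.get?, PySem.Dict.insert, PySem.Dict.empty,
    beq_iff_eq,
    h1,h2,h3,h4,h5,h6,h7,h8,h9,h10,h11,h12,h13,h14,h15,h16,h17,h18,
    Ne.symm h1, Ne.symm h2, Ne.symm h3, Ne.symm h4, Ne.symm h5, Ne.symm h6,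
    Ne.symm h7, Ne.symm h8, Ne.symm h9, Ne.symm h10, Ne.symm h11, Ne.symm h12,
    Ne.symm h13, Ne.symm h14, Ne.symm h15, Ne.symm h16, Ne.symm h17, Ne.symm h18]

-- ===== VERDICT (by name: the statement is the Claim_ definition above) =====
theorem merge_wslr_spec : Claim_equal_merge_wslr := by
  intro wslr_id _
  unfold Spec_merge_wslr
  by_cases h : wslr_id ∈ pvAllIds
  · fin_cases h <;> decide
  · exact merge_wslr_eq_of_not_mem wslr_id h
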